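-- pv_equiv track=rewrite | github.com/seeligto/hexo_rl | scripts/sealbot_quality_diagnostic.py | count_formations
-- ===== SOURCE A (Python) =====
-- HEX_DIRS = [(1, 0), (0, 1), (1, -1)]
--
-- def count_formations(board_dict: dict[tuple[int, int], int]) -> dict[str, int]:
--     """Count open-three and open-four formations for each player.
--
--     Returns dict with keys: 'p1_open3', 'p1_open4', 'p2_open3', 'p2_open4'.
--     """
--     all_stones = set(board_dict.keys())
--     p1_stones = {pos for pos, p in board_dict.items() if p == 1}
--     p2_stones = {pos for pos, p in board_dict.items() if p == -1}
--
--     result = {'p1_open3': 0, 'p1_open4': 0, 'p2_open3': 0, 'p2_open4': 0}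
--     counted = set()  # avoid double-counting same formation
--
--     for player_label, player_stones in [('p1', p1_stones), ('p2', p2_stones)]:
--         for (q, r) in player_stones:
--             for dq, dr in HEX_DIRS:
--                 # Only start counting from the beginning of a line
--                 prev = (q - dq, r - dr)
--                 if prev in player_stones:
--                     continue  # not the start of this line
--
--                 # Walk forward
--                 count = 0
--                 cq, cr = q, r
--                 while (cq, cr) in player_stones:
--                     count += 1
--                     cq += dq
--                     cr += dr
--
--                 if count < 3:
--                     continue
--
--                 # Check open ends
--                 start_open = (q - dq, r - dr) not in all_stones
--                 end_open = (cq, cr) not in all_stones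
--
--                 # Formation key for dedup
--                 fkey = (q, r, dq, dr, player_label, count)
--                 if fkey in counted:
--                     continue
--                 counted.add(fkey)
--
--                 if count == 3 and start_open and end_open:
--                     result[f'{player_label}_open3'] += 1
--                 elif count == 4 and (start_open or end_open):
--                     result[f'{player_label}_open4'] += 1
--                 elif count >= 4 and start_open and end_open:
--                     result[f'{player_label}_open4'] += 1
--
--     return result
-- ===== SOURCE B (Python) =====
-- HEX_DIRS = [(1, 0), (0, 1), (1, -1)]
--
-- def count_formations(board_dict):
--     """Count open-three and open-four formations per player via a per-line
--     index: group each player's stones by line, sort positions, scan runs."""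
--     all_stones = set(board_dict)
--     result = {'p1_open3': 0, 'p1_open4': 0, 'p2_open3': 0, 'p2_open4': 0}
--     for label, player in (('p1', 1), ('p2', -1)):
--         for dq, dr in HEX_DIRS:
--             lines = {}
--             for (q, r), p in board_dict.items():
--                 if p != player:
--                     continue
--                 if (dq, dr) == (1, 0):
--                     key, pos = r, q
--                 elif (dq, dr) == (0, 1):
--                     key, pos = q, r
--                 else:
--                     key, pos = q + r, q
--                 lines.setdefault(key, []).append(pos)
--             for key, poss in lines.items():
--                 runs = []
--                 for x in sorted(poss):
--                     if runs and x == runs[-1][1] + 1: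
--                         runs[-1] = (runs[-1][0], x)
--                     else:
--                         runs.append((x, x))
--                 for s, e in runs:
--                     n = e - s + 1
--                     if n < 3:
--                         continue
--                     if (dq, dr) == (1, 0):
--                         before, after = (s - 1, key), (e + 1, key)
--                     elif (dq, dr) == (0, 1):
--                         before, after = (key, s - 1), (key, e + 1)
--                     else:
--                         before, after = (s - 1, key - s + 1), (e + 1, key - e - 1)
--                     start_open = before not in all_stones
--                     end_open = after not in all_stones
--                     if n == 3 and start_open and end_open:
--                         result[f'{label}_open3'] += 1
--                     elif n == 4 and (start_open or end_open):
--                         result[f'{label}_open4'] += 1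
--                     elif n >= 5 and start_open and end_open:
--                         result[f'{label}_open4'] += 1
--     return result
-- ===== Notes on version B (the rewrite author's own statement) =====
-- stated objective: alternative
-- what changed: Replaces A's per-stone membership walk (start detection + while-loop along each direction) by a per-(player,direction) line index: stones are grouped into a dict keyed by the line invariant, positions are sorted once per line and maximal consecutive runs are extracted by a single scan, each run being classified once.
import Mathlib
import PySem

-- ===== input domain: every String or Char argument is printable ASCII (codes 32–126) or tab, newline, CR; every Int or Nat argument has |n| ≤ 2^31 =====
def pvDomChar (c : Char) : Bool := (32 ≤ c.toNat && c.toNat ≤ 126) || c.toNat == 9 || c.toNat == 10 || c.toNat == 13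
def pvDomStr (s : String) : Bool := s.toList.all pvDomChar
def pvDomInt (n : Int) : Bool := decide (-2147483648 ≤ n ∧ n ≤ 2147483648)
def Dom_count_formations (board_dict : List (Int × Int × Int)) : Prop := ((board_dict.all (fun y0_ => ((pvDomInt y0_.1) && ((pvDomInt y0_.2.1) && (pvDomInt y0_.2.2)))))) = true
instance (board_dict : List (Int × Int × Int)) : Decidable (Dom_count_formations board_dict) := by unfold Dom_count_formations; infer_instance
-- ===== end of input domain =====

-- B replaces A's per-stone membership walks by a per-(player,direction) line index
-- (group stones by line, sort positions, scan maximal runs once); objective: alternative.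

-- ===== PORT A =====

-- module constant HEX_DIRS
def hexDirs : List (Int × Int) := [(1, 0), (0, 1), (1, -1)]

-- the flattened input triples (q, r, p) read back as dict items ((q, r), p)
def pvItems (board : List (Int × Int × Int)) : List ((Int × Int) × Int) :=
  board.map (fun e => ((e.1, e.2.1), e.2.2))

-- result[k] += 1
def pvIncr (d : PySem.Dict String Int) (k : String) : PySem.Dict String Int :=
  d.insert k (d.getD k 0 + 1)

-- the 'while (cq, cr) in player_stones' walk: returns (count, final cell); fuel bounds
-- the iteration count (the walked cells are distinct members of `stones`)
def walkA (stones : List (Int × Int)) (d : Int × Int) : (Int × Int) → Nat → Int × (Int × Int)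
  | c, 0 => (0, c)
  | c, fuel + 1 =>
    if stones.contains c then
      let w := walkA stones d (c.1 + d.1, c.2 + d.2) fuel
      (w.1 + 1, w.2)
    else (0, c)

def count_formations (board_dict : List (Int × Int × Int)) : List (String × Int) :=
  let items := pvItems board_dict
  let allStones : PySem.Set (Int × Int) := PySem.Set.ofList (items.map (·.1))
  let p1 : PySem.Set (Int × Int) := PySem.Set.ofList ((items.filter (fun it => it.2 == 1)).map (·.1))
  let p2 : PySem.Set (Int × Int) := PySem.Set.ofList ((items.filter (fun it => it.2 == -1)).map (·.1))
  let result0 : PySem.Dict String Int :=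
    PySem.Dict.ofList [("p1_open3", 0), ("p1_open4", 0), ("p2_open3", 0), ("p2_open4", 0)]
  let fin :=
    [("p1", p1), ("p2", p2)].foldl (fun st pl =>
      pl.2.foldl (fun st c =>
        hexDirs.foldl (fun st d =>
          let prev := (c.1 - d.1, c.2 - d.2)
          if pl.2.contains prev then st
          else
            let w := walkA pl.2 d c (pl.2.length + 1)
            if w.1 < 3 then st
            else
              let startOpen := !(allStones.contains prev)
              let endOpen := !(allStones.contains w.2)
              let fkey := (c.1, c.2, d.1, d.2, pl.1, w.1)
              if st.2.contains fkey then st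
              else
                let counted := st.2.add fkey
                if w.1 == 3 && startOpen && endOpen then
                  (pvIncr st.1 (pl.1 ++ "_open3"), counted)
                else if w.1 == 4 && (startOpen || endOpen) then
                  (pvIncr st.1 (pl.1 ++ "_open4"), counted)
                else if decide (4 ≤ w.1) && startOpen && endOpen then
                  (pvIncr st.1 (pl.1 ++ "_open4"), counted)
                else (st.1, counted)) st) st)
      (result0, (PySem.Set.empty : PySem.Set (Int × Int × Int × Int × String × Int)))
  fin.1.items

-- ===== PORT B =====

-- (key, pos): the invariant of the line through c in direction d, and the coordinate along it
def lineKeyPos (d : Int × Int) (c : Int × Int) : Int × Int :=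
  if d == (1, 0) then (c.2, c.1)
  else if d == (0, 1) then (c.1, c.2)
  else (c.1 + c.2, c.1)

-- the two cells just before / just after a run [s, e] on line k in direction d
def lineCells (d : Int × Int) (k s e : Int) : (Int × Int) × (Int × Int) :=
  if d == (1, 0) then ((s - 1, k), (e + 1, k))
  else if d == (0, 1) then ((k, s - 1), (k, e + 1))
  else ((s - 1, k - s + 1), (e + 1, k - e - 1))

-- one step of the run scan (runs kept reversed, current run at the head)
def runsStep (rs : List (Int × Int)) (x : Int) : List (Int × Int) :=
  match rs with
  | (s, e) :: rest => if x == e + 1 then (s, x) :: rest else (x, x) :: (s, e) :: rest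
  | [] => [(x, x)]

-- maximal consecutive runs of a sorted position list
def runsOfB (ps : List Int) : List (Int × Int) :=
  (ps.foldl runsStep []).reverse

def count_formations_alt (board_dict : List (Int × Int × Int)) : List (String × Int) :=
  let items := pvItems board_dict
  let allStones : PySem.Set (Int × Int) := PySem.Set.ofList (items.map (·.1))
  let result0 : PySem.Dict String Int :=
    PySem.Dict.ofList [("p1_open3", 0), ("p1_open4", 0), ("p2_open3", 0), ("p2_open4", 0)]
  let fin :=
    [("p1", (1 : Int)), ("p2", (-1 : Int))].foldl (fun res pl =>
      hexDirs.foldl (fun res d =>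
        let lines : PySem.Dict Int (List Int) :=
          items.foldl (fun dct it =>
            if it.2 == pl.2 then
              let kp := lineKeyPos d it.1
              dct.modify kp.1 [] (· ++ [kp.2])
            else dct) PySem.Dict.empty
        lines.items.foldl (fun res kv =>
          (runsOfB (PySem.List.sorted kv.2 (fun x => x) false)).foldl (fun res se =>
            let n := se.2 - se.1 + 1
            if n < 3 then res
            else
              let cells := lineCells d kv.1 se.1 se.2
              let so := !(allStones.contains cells.1)
              let eo := !(allStones.contains cells.2)
              if n == 3 && so && eo then pvIncr res (pl.1 ++ "_open3")
              else if n == 4 && (so || eo) then pvIncr res (pl.1 ++ "_open4")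
              else if decide (5 ≤ n) && so && eo then pvIncr res (pl.1 ++ "_open4")
              else res) res) res) res) result0
  fin.items

-- ===== PRECONDITION & SPEC =====

-- Pre_ excludes lists with duplicate (q, r) keys: those do not arise as the item list of a
-- Python dict (the tested input type), and on them the two ports read the duplicates differently.
def Pre_count_formations (board_dict : List (Int × Int × Int)) : Prop :=
  (board_dict.map (fun e => (e.1, e.2.1))).Nodup
instance (board_dict : List (Int × Int × Int)) : Decidable (Pre_count_formations board_dict) := by
  unfold Pre_count_formations; infer_instance

def pvWitness_count_formations : (List (Int × Int × Int)) :=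
  [(0, 0, 1), (1, 0, 1), (2, 0, 1), (0, 1, -1)]

def Spec_count_formations (board_dict : List (Int × Int × Int)) (out : List (String × Int)) : Prop := out = count_formations_alt board_dict
instance (board_dict : List (Int × Int × Int)) (out : List (String × Int)) : Decidable (Spec_count_formations board_dict out) := by unfold Spec_count_formations; infer_instance

-- ===== CLAIM (what is proved, stated in full; the proofs are below) =====
def Claim_equal_count_formations : Prop := ∀ (board_dict : List (Int × Int × Int)), Dom_count_formations board_dict → Pre_count_formations board_dict → Spec_count_formations board_dict (count_formations board_dict)

-- ===== LEMMAS AND PROOFS =====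


-- ---------- proof-side helper definitions ----------

abbrev AState := PySem.Dict String Int × PySem.Set (Int × Int × Int × Int × String × Int)

def fkeyOf (lab : String) (c d : Int × Int) (cnt : Int) : Int × Int × Int × Int × String × Int :=
  (c.1, c.2, d.1, d.2, lab, cnt)

-- A's classification chain as a key list
def clsKeys (lab : String) (cnt : Int) (so eo : Bool) : List String :=
  if cnt == 3 && so && eo then [lab ++ "_open3"]
  else if cnt == 4 && (so || eo) then [lab ++ "_open4"]
  else if decide (4 ≤ cnt) && so && eo then [lab ++ "_open4"]
  else []

-- the keys A's body increments for stone c and direction d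
def aKeys (allS P : List (Int × Int)) (lab : String) (c d : Int × Int) : List String :=
  if P.contains (c.1 - d.1, c.2 - d.2) then []
  else
    let w := walkA P d c (P.length + 1)
    if w.1 < 3 then []
    else clsKeys lab w.1 (!(allS.contains (c.1 - d.1, c.2 - d.2))) (!(allS.contains w.2))

-- the keys B's body increments for run se on line k in direction d
def bKeys (allS : List (Int × Int)) (lab : String) (d : Int × Int) (k : Int) (se : Int × Int) : List String :=
  let n := se.2 - se.1 + 1
  if n < 3 then []
  else
    let cells := lineCells d k se.1 se.2
    let so := !(allS.contains cells.1)
    let eo := !(allS.contains cells.2)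
    if n == 3 && so && eo then [lab ++ "_open3"]
    else if n == 4 && (so || eo) then [lab ++ "_open4"]
    else if decide (5 ≤ n) && so && eo then [lab ++ "_open4"]
    else []

def incrFold (d : PySem.Dict String Int) (ks : List String) : PySem.Dict String Int :=
  ks.foldl pvIncr d

def pvResult0 : PySem.Dict String Int :=
  PySem.Dict.ofList [("p1_open3", 0), ("p1_open4", 0), ("p2_open3", 0), ("p2_open4", 0)]

def pSet (board : List (Int × Int × Int)) (v : Int) : PySem.Set (Int × Int) :=
  PySem.Set.ofList (((pvItems board).filter (fun it => it.2 == v)).map (·.1))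

def allOf (board : List (Int × Int × Int)) : PySem.Set (Int × Int) :=
  PySem.Set.ofList ((pvItems board).map (·.1))

-- A's loop body for one (stone, direction)
def aStep (allS P : List (Int × Int)) (lab : String) (st : AState) (c d : Int × Int) : AState :=
  let prev := (c.1 - d.1, c.2 - d.2)
  if P.contains prev then st
  else
    let w := walkA P d c (P.length + 1)
    if w.1 < 3 then st
    else
      let startOpen := !(allS.contains prev)
      let endOpen := !(allS.contains w.2)
      let fkey := (c.1, c.2, d.1, d.2, lab, w.1)
      if st.2.contains fkey then st
      else
        let counted := st.2.add fkey
        if w.1 == 3 && startOpen && endOpen then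
          (pvIncr st.1 (lab ++ "_open3"), counted)
        else if w.1 == 4 && (startOpen || endOpen) then
          (pvIncr st.1 (lab ++ "_open4"), counted)
        else if decide (4 ≤ w.1) && startOpen && endOpen then
          (pvIncr st.1 (lab ++ "_open4"), counted)
        else (st.1, counted)

def aPlayerFold (allS P : List (Int × Int)) (lab : String) (Q : List (Int × Int)) (st : AState) : AState :=
  Q.foldl (fun st c => hexDirs.foldl (fun st d => aStep allS P lab st c d) st) st

-- B's pieces
def linesDict (items : List ((Int × Int) × Int)) (pv : Int) (d : Int × Int) : PySem.Dict Int (List Int) :=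
  items.foldl (fun dct it =>
    if it.2 == pv then
      let kp := lineKeyPos d it.1
      dct.modify kp.1 [] (· ++ [kp.2])
    else dct) PySem.Dict.empty

def bStep (allS : List (Int × Int)) (lab : String) (d : Int × Int) (k : Int)
    (res : PySem.Dict String Int) (se : Int × Int) : PySem.Dict String Int :=
  let n := se.2 - se.1 + 1
  if n < 3 then res
  else
    let cells := lineCells d k se.1 se.2
    let so := !(allS.contains cells.1)
    let eo := !(allS.contains cells.2)
    if n == 3 && so && eo then pvIncr res (lab ++ "_open3")
    else if n == 4 && (so || eo) then pvIncr res (lab ++ "_open4")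
    else if decide (5 ≤ n) && so && eo then pvIncr res (lab ++ "_open4")
    else res

def bDirFold (allS : List (Int × Int)) (items : List ((Int × Int) × Int)) (lab : String) (pv : Int)
    (res : PySem.Dict String Int) (d : Int × Int) : PySem.Dict String Int :=
  (linesDict items pv d).items.foldl (fun res kv =>
    (runsOfB (PySem.List.sorted kv.2 (fun x => x) false)).foldl (bStep allS lab d kv.1) res) res

-- the position of a cell along line k (inverse of lineKeyPos)
def cellOfPos (d : Int × Int) (k t : Int) : Int × Int :=
  if d == (1, 0) then (t, k) else if d == (0, 1) then (k, t) else (t, k - t)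

-- integer version of A's walk along one line
def walkI (qs : List Int) : Int → Nat → Int
  | _, 0 => 0
  | t, fuel + 1 => if qs.contains t then walkI qs (t + 1) fuel + 1 else 0

-- structural form of the run scan
def runsGo (s e : Int) : List Int → List (Int × Int)
  | [] => [(s, e)]
  | x :: xs => if x = e + 1 then runsGo s x xs else (s, e) :: runsGo x x xs

-- ---------- generic list lemmas ----------

theorem incrFold_append (d : PySem.Dict String Int) (ks ks' : List String) :
    incrFold d (ks ++ ks') = incrFold (incrFold d ks) ks' := by
  simp [incrFold]

theorem foldl_incr_flatMap {α : Type} (l : List α) (g : α → List String) (d : PySem.Dict String Int) :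
    l.foldl (fun res x => incrFold res (g x)) d = incrFold d (l.flatMap g) := by
  induction l generalizing d with
  | nil => rfl
  | cons a l ih => simp [List.flatMap_cons, incrFold_append, ih]

theorem count_flatMap {α : Type} (l : List α) (g : α → List String) (k : String) :
    ((l.flatMap g).count k) = (l.map (fun x => (g x).count k)).sum := by
  induction l with
  | nil => rfl
  | cons a l ih => simp [List.flatMap_cons, List.count_append, ih]

theorem sum_map_add_nat {α : Type} (l : List α) (f g : α → Nat) :
    (l.map (fun x => f x + g x)).sum = (l.map f).sum + (l.map g).sum := by
  induction l with
  | nil => rfl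
  | cons a l ih => simp [ih]; omega

theorem sum_swap_nat {α β : Type} (xs : List α) (ys : List β) (f : α → β → Nat) :
    (xs.map (fun x => (ys.map (fun y => f x y)).sum)).sum
      = (ys.map (fun y => (xs.map (fun x => f x y)).sum)).sum := by
  induction xs with
  | nil => simp
  | cons a xs ih => simp [ih]

theorem sum_if_single {κ : Type} [DecidableEq κ] (ks : List κ) (k : κ) (v : Nat)
    (hk : k ∈ ks) (hnd : ks.Nodup) :
    (ks.map (fun k' => if k = k' then v else 0)).sum = v := by
  induction ks with
  | nil => cases hk
  | cons a ks ih =>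
    rcases List.mem_cons.1 hk with h | h
    · subst h
      have : ∀ k' ∈ ks, (if k = k' then v else 0) = 0 := by
        intro k' hk'
        have : k ≠ k' := by rintro rfl; exact (List.nodup_cons.1 hnd).1 hk'
        simp [this]
      simp [List.map_congr_left this]
    · have hne : k ≠ a := by rintro rfl; exact (List.nodup_cons.1 hnd).1 h
      simp [hne, ih h (List.nodup_cons.1 hnd).2]

theorem sum_partition {α κ : Type} [DecidableEq κ] (P : List α) (keyfn : α → κ) (F : α → Nat)
    (ks : List κ) (hnd : ks.Nodup) (hcov : ∀ c ∈ P, keyfn c ∈ ks) :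
    (P.map F).sum = (ks.map (fun k => ((P.filter (fun c => keyfn c == k)).map F).sum)).sum := by
  induction P with
  | nil => simp
  | cons a P ih =>
    have hcov' : ∀ c ∈ P, keyfn c ∈ ks := fun c hc => hcov c (List.mem_cons_of_mem _ hc)
    have : ∀ k ∈ ks, ((List.filter (fun c => keyfn c == k) (a :: P)).map F).sum
        = (if keyfn a = k then F a else 0) + ((P.filter (fun c => keyfn c == k)).map F).sum := by
      intro k _
      by_cases h : keyfn a = k <;> simp [h]
    rw [List.map_congr_left this, sum_map_add_nat]
    simp only [List.map_cons, List.sum_cons]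
    rw [sum_if_single ks (keyfn a) (F a) (hcov a (List.mem_cons_self)) hnd, ih hcov']

theorem sum_filter_of_zero (l : List Int) (p : Int → Bool) (g : Int → Nat)
    (h0 : ∀ x ∈ l, p x = false → g x = 0) :
    ((l.filter p).map g).sum = (l.map g).sum := by
  induction l with
  | nil => rfl
  | cons a l ih =>
    have ih' := ih (fun x hx => h0 x (List.mem_cons_of_mem _ hx))
    by_cases h : p a <;> simp [h, ih']
    rw [h0 a List.mem_cons_self (by simp [h])]

-- ---------- the 4-key counter dict ----------

theorem incr4_eval (ks : List String)
    (h : ∀ k ∈ ks, k = "p1_open3" ∨ k = "p1_open4" ∨ k = "p2_open3" ∨ k = "p2_open4") :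
    ∀ v1 v2 v3 v4 : Int,
    incrFold (PySem.Dict.ofList [("p1_open3", v1), ("p1_open4", v2), ("p2_open3", v3), ("p2_open4", v4)]) ks
      = PySem.Dict.ofList [("p1_open3", v1 + ks.count "p1_open3"), ("p1_open4", v2 + ks.count "p1_open4"),
          ("p2_open3", v3 + ks.count "p2_open3"), ("p2_open4", v4 + ks.count "p2_open4")] := by
  induction ks with
  | nil => intro v1 v2 v3 v4; simp [incrFold]
  | cons k ks ih =>
    intro v1 v2 v3 v4
    have h' : ∀ x ∈ ks, x = "p1_open3" ∨ x = "p1_open4" ∨ x = "p2_open3" ∨ x = "p2_open4" :=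
      fun x hx => h x (List.mem_cons_of_mem _ hx)
    have step : ∀ (d : PySem.Dict String Int),
        incrFold d (k :: ks) = incrFold (pvIncr d k) ks := fun _ => rfl
    rcases h k List.mem_cons_self with rfl | rfl | rfl | rfl
    · rw [step, show pvIncr (PySem.Dict.ofList [("p1_open3", v1), ("p1_open4", v2), ("p2_open3", v3), ("p2_open4", v4)]) "p1_open3"
            = PySem.Dict.ofList [("p1_open3", v1 + 1), ("p1_open4", v2), ("p2_open3", v3), ("p2_open4", v4)] from rfl, ih h']
      congr 1
      simp [List.count_cons]
      omega
    · rw [step, show pvIncr (PySem.Dict.ofList [("p1_open3", v1), ("p1_open4", v2), ("p2_open3", v3), ("p2_open4", v4)]) "p1_open4"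
            = PySem.Dict.ofList [("p1_open3", v1), ("p1_open4", v2 + 1), ("p2_open3", v3), ("p2_open4", v4)] from rfl, ih h']
      congr 1
      simp [List.count_cons]
      omega
    · rw [step, show pvIncr (PySem.Dict.ofList [("p1_open3", v1), ("p1_open4", v2), ("p2_open3", v3), ("p2_open4", v4)]) "p2_open3"
            = PySem.Dict.ofList [("p1_open3", v1), ("p1_open4", v2), ("p2_open3", v3 + 1), ("p2_open4", v4)] from rfl, ih h']
      congr 1
      simp [List.count_cons]
      omega
    · rw [step, show pvIncr (PySem.Dict.ofList [("p1_open3", v1), ("p1_open4", v2), ("p2_open3", v3), ("p2_open4", v4)]) "p2_open4"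
            = PySem.Dict.ofList [("p1_open3", v1), ("p1_open4", v2), ("p2_open3", v3), ("p2_open4", v4 + 1)] from rfl, ih h']
      congr 1
      simp [List.count_cons]
      omega

-- ---------- A-side reduction ----------

theorem aStep_fst (allS P : List (Int × Int)) (lab : String) (st : AState) (c d : Int × Int)
    (hfk : ∀ cnt, (fkeyOf lab c d cnt) ∉ st.2) :
    (aStep allS P lab st c d).1 = incrFold st.1 (aKeys allS P lab c d) := by
  simp only [aStep, aKeys, clsKeys, incrFold]
  split_ifs
  all_goals try rfl
  all_goals exact absurd (List.contains_iff_mem.mp (by assumption)) (by simpa [fkeyOf] using hfk _)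

theorem aStep_snd (allS P : List (Int × Int)) (lab : String) (st : AState) (c d : Int × Int) :
    ∀ t ∈ (aStep allS P lab st c d).2, t ∈ st.2 ∨ ∃ cnt, t = fkeyOf lab c d cnt := by
  intro t
  simp only [aStep]
  split_ifs <;> intro ht
  all_goals try exact Or.inl ht
  all_goals rcases (PySem.Set.mem_add ..).1 ht with h | h
  all_goals try exact Or.inl h
  all_goals exact Or.inr ⟨_, by simpa [fkeyOf] using h⟩

theorem fkeyOf_inj {lab lab' : String} {c c' d d' : Int × Int} {cnt cnt' : Int}
    (h : fkeyOf lab c d cnt = fkeyOf lab' c' d' cnt') : lab = lab' ∧ c = c' ∧ d = d' := by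
  simp only [fkeyOf, Prod.mk.injEq] at h
  obtain ⟨h1, h2, h3, h4, h5, h6⟩ := h
  exact ⟨h5, Prod.ext h1 h2, Prod.ext h3 h4⟩

theorem aDirs_eq (allS P : List (Int × Int)) (lab : String) (c : Int × Int) :
    ∀ (ds : List (Int × Int)) (st : AState), ds.Nodup →
    (∀ d ∈ ds, ∀ cnt, (fkeyOf lab c d cnt) ∉ st.2) →
    (ds.foldl (fun st d => aStep allS P lab st c d) st).1
        = incrFold st.1 (ds.flatMap (fun d => aKeys allS P lab c d))
      ∧ ∀ t ∈ (ds.foldl (fun st d => aStep allS P lab st c d) st).2,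
          t ∈ st.2 ∨ ∃ d ∈ ds, ∃ cnt, t = fkeyOf lab c d cnt := by
  intro ds
  induction ds with
  | nil => intro st _ _; exact ⟨rfl, fun t ht => Or.inl ht⟩
  | cons a ds ih =>
    intro st hnd hfk
    have hfka : ∀ cnt, (fkeyOf lab c a cnt) ∉ st.2 := hfk a List.mem_cons_self
    have hsnd := aStep_snd allS P lab st c a
    have hfk' : ∀ d ∈ ds, ∀ cnt, (fkeyOf lab c d cnt) ∉ (aStep allS P lab st c a).2 := by
      intro d hd cnt hmem
      rcases hsnd _ hmem with h | ⟨cnt', h⟩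
      · exact hfk d (List.mem_cons_of_mem _ hd) cnt h
      · have := (fkeyOf_inj h).2.2
        exact (List.nodup_cons.1 hnd).1 (this ▸ hd)
    have ihs := ih (aStep allS P lab st c a) (List.nodup_cons.1 hnd).2 hfk'
    constructor
    · rw [List.foldl_cons, ihs.1, aStep_fst allS P lab st c a hfka, List.flatMap_cons, incrFold_append]
    · intro t ht
      rw [List.foldl_cons] at ht
      rcases ihs.2 t ht with h | ⟨d, hd, cnt, rfl⟩
      · rcases hsnd t h with h' | ⟨cnt, rfl⟩
        · exact Or.inl h'
        · exact Or.inr ⟨a, List.mem_cons_self, _, rfl⟩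
      · exact Or.inr ⟨d, List.mem_cons_of_mem _ hd, _, rfl⟩

theorem aPlayer_eq (allS P : List (Int × Int)) (lab : String) :
    ∀ (Q : List (Int × Int)) (st : AState), Q.Nodup →
    (∀ c ∈ Q, ∀ d ∈ hexDirs, ∀ cnt, (fkeyOf lab c d cnt) ∉ st.2) →
    (aPlayerFold allS P lab Q st).1
        = incrFold st.1 (Q.flatMap (fun c => hexDirs.flatMap (fun d => aKeys allS P lab c d)))
      ∧ ∀ t ∈ (aPlayerFold allS P lab Q st).2,
          t ∈ st.2 ∨ ∃ c ∈ Q, ∃ d cnt, t = fkeyOf lab c d cnt := by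
  intro Q
  induction Q with
  | nil => intro st _ _; exact ⟨rfl, fun t ht => Or.inl ht⟩
  | cons a Q ih =>
    intro st hnd hfk
    have hdirs := aDirs_eq allS P lab a hexDirs st (by decide)
      (fun d hd cnt => hfk a List.mem_cons_self d hd cnt)
    have hfk' : ∀ c ∈ Q, ∀ d ∈ hexDirs, ∀ cnt,
        (fkeyOf lab c d cnt) ∉ (hexDirs.foldl (fun st d => aStep allS P lab st a d) st).2 := by
      intro c hc d hd cnt hmem
      rcases hdirs.2 _ hmem with h | ⟨d', _, cnt', h⟩
      · exact hfk c (List.mem_cons_of_mem _ hc) d hd cnt h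
      · have := (fkeyOf_inj h).2.1
        exact (List.nodup_cons.1 hnd).1 (this ▸ hc)
    have ihs := ih (hexDirs.foldl (fun st d => aStep allS P lab st a d) st)
      (List.nodup_cons.1 hnd).2 hfk'
    constructor
    · show (aPlayerFold allS P lab Q (hexDirs.foldl (fun st d => aStep allS P lab st a d) st)).1 = _
      rw [ihs.1, hdirs.1, List.flatMap_cons, incrFold_append]
    · intro t ht
      have ht' : t ∈ (aPlayerFold allS P lab Q
          (hexDirs.foldl (fun st d => aStep allS P lab st a d) st)).2 := ht
      rcases ihs.2 t ht' with h | ⟨c, hc, d, cnt, rfl⟩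
      · rcases hdirs.2 t h with h' | ⟨d, _, cnt, rfl⟩
        · exact Or.inl h'
        · exact Or.inr ⟨a, List.mem_cons_self, d, cnt, rfl⟩
      · exact Or.inr ⟨c, List.mem_cons_of_mem _ hc, d, cnt, rfl⟩

theorem pSet_nodup (board : List (Int × Int × Int)) (v : Int) :
    (pSet board v).Nodup := PySem.Set.nodup_ofList _

theorem countA_shape (board : List (Int × Int × Int)) :
    count_formations board
      = (aPlayerFold (allOf board) (pSet board (-1)) "p2" (pSet board (-1))
          (aPlayerFold (allOf board) (pSet board 1) "p1" (pSet board 1)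
            (pvResult0, PySem.Set.empty))).1.items := by
  rfl

theorem countA_keys (board : List (Int × Int × Int)) (hPre : Pre_count_formations board) :
    count_formations board
      = (incrFold pvResult0
          (((pSet board 1).flatMap (fun c => hexDirs.flatMap (fun d => aKeys (allOf board) (pSet board 1) "p1" c d)))
            ++ ((pSet board (-1)).flatMap (fun c => hexDirs.flatMap (fun d => aKeys (allOf board) (pSet board (-1)) "p2" c d))))).items := by
  rw [countA_shape]
  have h1 := aPlayer_eq (allOf board) (pSet board 1) "p1" (pSet board 1)
    (pvResult0, PySem.Set.empty) (pSet_nodup board 1)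
    (by intro c _ d _ cnt h; simp [PySem.Set.empty] at h)
  have h2 := aPlayer_eq (allOf board) (pSet board (-1)) "p2"  (pSet board (-1))
    (aPlayerFold (allOf board) (pSet board 1) "p1" (pSet board 1) (pvResult0, PySem.Set.empty))
    (pSet_nodup board (-1))
    (by
      intro c _ d _ cnt h
      rcases h1.2 _ h with h' | ⟨c', _, d', cnt', he⟩
      · simp [PySem.Set.empty] at h'
      · have : "p2" = "p1" := (fkeyOf_inj he).1
        simp at this)
  rw [h2.1, h1.1, ← incrFold_append]

-- ---------- B-side reduction ----------

theorem countB_shape (board : List (Int × Int × Int)) :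
    count_formations_alt board
      = (hexDirs.foldl (bDirFold (allOf board) (pvItems board) "p2" (-1))
          (hexDirs.foldl (bDirFold (allOf board) (pvItems board) "p1" 1) pvResult0)).items := by
  rfl

theorem bStep_eq (allS : List (Int × Int)) (lab : String) (d : Int × Int) (k : Int)
    (res : PySem.Dict String Int) (se : Int × Int) :
    bStep allS lab d k res se = incrFold res (bKeys allS lab d k se) := by
  simp only [bStep, bKeys, incrFold]
  split_ifs <;> rfl

theorem bDirFold_eq (allS : List (Int × Int)) (items : List ((Int × Int) × Int)) (lab : String)
    (pv : Int) (res : PySem.Dict String Int) (d : Int × Int) :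
    bDirFold allS items lab pv res d
      = incrFold res ((linesDict items pv d).items.flatMap (fun kv =>
          (runsOfB (PySem.List.sorted kv.2 (fun x => x) false)).flatMap (bKeys allS lab d kv.1))) := by
  unfold bDirFold
  have hstep : ∀ k : Int, bStep allS lab d k = fun res se => incrFold res (bKeys allS lab d k se) :=
    fun k => funext fun res => funext fun se => bStep_eq allS lab d k res se
  have hinner : (fun (res : PySem.Dict String Int) (kv : Int × List Int) =>
        (runsOfB (PySem.List.sorted kv.2 (fun x => x) false)).foldl (bStep allS lab d kv.1) res)
      = fun res kv => incrFold res ((runsOfB (PySem.List.sorted kv.2 (fun x => x) false)).flatMap (bKeys allS lab d kv.1)) := by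
    funext res kv
    rw [hstep kv.1, foldl_incr_flatMap]
  rw [hinner, foldl_incr_flatMap]

theorem countB_keys (board : List (Int × Int × Int)) :
    count_formations_alt board
      = (incrFold pvResult0
          ((hexDirs.flatMap (fun d => (linesDict (pvItems board) 1 d).items.flatMap (fun kv =>
              (runsOfB (PySem.List.sorted kv.2 (fun x => x) false)).flatMap (bKeys (allOf board) "p1" d kv.1))))
            ++ (hexDirs.flatMap (fun d => (linesDict (pvItems board) (-1) d).items.flatMap (fun kv =>
              (runsOfB (PySem.List.sorted kv.2 (fun x => x) false)).flatMap (bKeys (allOf board) "p2" d kv.1)))))).items := by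
  rw [countB_shape]
  have hb : ∀ (lab : String) (pv : Int) (res : PySem.Dict String Int),
      hexDirs.foldl (bDirFold (allOf board) (pvItems board) lab pv) res
        = incrFold res (hexDirs.flatMap (fun d => (linesDict (pvItems board) pv d).items.flatMap (fun kv =>
            (runsOfB (PySem.List.sorted kv.2 (fun x => x) false)).flatMap (bKeys (allOf board) lab d kv.1)))) := by
    intro lab pv res
    have : bDirFold (allOf board) (pvItems board) lab pv
        = fun res d => incrFold res ((linesDict (pvItems board) pv d).items.flatMap (fun kv =>
            (runsOfB (PySem.List.sorted kv.2 (fun x => x) false)).flatMap (bKeys (allOf board) lab d kv.1))) := by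
      funext res d
      exact bDirFold_eq (allOf board) (pvItems board) lab pv res d
    rw [this, foldl_incr_flatMap]
  rw [hb, hb, ← incrFold_append]

-- ---------- geometry of the three directions ----------

theorem cell_kp (d : Int × Int) (hd : d ∈ hexDirs) (c : Int × Int) :
    cellOfPos d (lineKeyPos d c).1 (lineKeyPos d c).2 = c := by
  simp only [hexDirs, List.mem_cons, List.not_mem_nil, or_false] at hd
  rcases hd with rfl | rfl | rfl <;>
    simp [cellOfPos, lineKeyPos, Prod.ext_iff] <;> omega

theorem kp_cell (d : Int × Int) (hd : d ∈ hexDirs) (k t : Int) :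
    lineKeyPos d (cellOfPos d k t) = (k, t) := by
  simp only [hexDirs, List.mem_cons, List.not_mem_nil, or_false] at hd
  rcases hd with rfl | rfl | rfl <;>
    simp [cellOfPos, lineKeyPos, Prod.ext_iff] <;> omega

theorem cell_add (d : Int × Int) (hd : d ∈ hexDirs) (k t : Int) :
    ((cellOfPos d k t).1 + d.1, (cellOfPos d k t).2 + d.2) = cellOfPos d k (t + 1) := by
  simp only [hexDirs, List.mem_cons, List.not_mem_nil, or_false] at hd
  rcases hd with rfl | rfl | rfl <;>
    simp [cellOfPos, Prod.ext_iff] <;> omega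

theorem cell_sub (d : Int × Int) (hd : d ∈ hexDirs) (k t : Int) :
    ((cellOfPos d k t).1 - d.1, (cellOfPos d k t).2 - d.2) = cellOfPos d k (t - 1) := by
  simp only [hexDirs, List.mem_cons, List.not_mem_nil, or_false] at hd
  rcases hd with rfl | rfl | rfl <;>
    simp [cellOfPos, Prod.ext_iff] <;> omega

theorem lineCells_eq (d : Int × Int) (hd : d ∈ hexDirs) (k s e : Int) :
    lineCells d k s e = (cellOfPos d k (s - 1), cellOfPos d k (e + 1)) := by
  simp only [hexDirs, List.mem_cons, List.not_mem_nil, or_false] at hd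
  rcases hd with rfl | rfl | rfl <;>
    simp [cellOfPos, lineCells, Prod.ext_iff] <;> omega

-- ---------- walk along a line ----------

theorem walkA_line (P : List (Int × Int)) (d : Int × Int) (hd : d ∈ hexDirs) (k : Int)
    (qs : List Int) (hmem : ∀ t : Int, cellOfPos d k t ∈ P ↔ t ∈ qs) :
    ∀ (fuel : Nat) (t : Int),
      walkA P d (cellOfPos d k t) fuel = (walkI qs t fuel, cellOfPos d k (t + walkI qs t fuel)) := by
  intro fuel
  induction fuel with
  | zero => intro t; simp [walkA, walkI]
  | succ f ih =>
    intro t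
    have hmem' : P.contains (cellOfPos d k t) = qs.contains t := by
      by_cases h : t ∈ qs
      · simp [h, (hmem t).2 h]
      · have : cellOfPos d k t ∉ P := fun hc => h ((hmem t).1 hc)
        simp [h, this]
    by_cases h : qs.contains t = true
    · have hihs := ih (t + 1)
      simp only [walkA, walkI, hmem', h, if_true]
      rw [show ((cellOfPos d k t).1 + d.1, (cellOfPos d k t).2 + d.2) = cellOfPos d k (t + 1) from cell_add d hd k t]
      rw [hihs]
      exact Prod.ext rfl (by congr 1; ring)
    · have h' : qs.contains t = false := by simpa using h
      simp only [walkA, walkI, hmem', h']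
      simp only [Bool.false_eq_true, if_false]
      rw [show t + (0 : Int) = t by ring]

theorem walkI_char (qs : List Int) (t : Int) (n : Nat)
    (hin : ∀ i : Nat, i < n → (t + i) ∈ qs) (hout : (t + n) ∉ qs) :
    ∀ fuel : Nat, n < fuel → walkI qs t fuel = n := by
  induction n generalizing t with
  | zero =>
    intro fuel hf
    obtain ⟨f, rfl⟩ : ∃ f, fuel = f + 1 := ⟨fuel - 1, by omega⟩
    have h0 : t ∉ qs := by simpa using hout
    simp [walkI, h0]
  | succ m ih =>
    intro fuel hf
    obtain ⟨f, rfl⟩ : ∃ f, fuel = f + 1 := ⟨fuel - 1, by omega⟩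
    have ht : t ∈ qs := by simpa using hin 0 (by omega)
    have hin' : ∀ i : Nat, i < m → (t + 1 + i) ∈ qs := by
      intro i hi
      have h2 := hin (i + 1) (by omega)
      have e : (((i + 1 : Nat)) : Int) = (i : Int) + 1 := by push_cast; ring
      rw [e] at h2
      have e2 : t + ((i : Int) + 1) = t + 1 + i := by ring
      rwa [e2] at h2
    have hout' : (t + 1 + m) ∉ qs := by
      have e : ((m + 1 : Nat) : Int) = (m : Int) + 1 := by push_cast; ring
      rw [e] at hout
      intro hc
      apply hout
      have e2 : t + 1 + (m : Int) = t + ((m : Int) + 1) := by ring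
      rwa [e2] at hc
    have hrec := ih (t + 1) hin' hout' f (by omega)
    have hct : qs.contains t = true := List.contains_iff_mem.mpr ht
    simp only [walkI, hct, if_true, hrec]
    push_cast
    ring

-- ---------- runs of a strictly increasing list ----------

theorem runsOfB_go (ps : List Int) :
    runsOfB ps = match ps with
      | [] => []
      | x :: xs => runsGo x x xs := by
  cases ps with
  | nil => rfl
  | cons x xs =>
    have main : ∀ (xs : List Int) (s e : Int) (acc : List (Int × Int)),
        xs.foldl runsStep ((s, e) :: acc) = (runsGo s e xs).reverse ++ acc := by
      intro xs
      induction xs with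
      | nil => intro s e acc; simp [runsGo]
      | cons x xs ih =>
        intro s e acc
        by_cases h : x = e + 1
        · simp [runsStep, runsGo, h, ih]
        · have hb : (x == e + 1) = false := by simpa using h
          simp [runsStep, runsGo, h, hb, ih]
    show (List.foldl runsStep [] (x :: xs)).reverse = runsGo x x xs
    have : List.foldl runsStep [] (x :: xs) = List.foldl runsStep [(x, x)] xs := rfl
    rw [this, main xs x x []]
    simp

theorem runsGo_sum (g : Int → Nat) (h : Int × Int → Nat)
    (qs : List Int) (hq : qs.Pairwise (· < ·))
    (hgh : ∀ s e : Int, s ≤ e → (∀ i, s ≤ i → i ≤ e → i ∈ qs) → (s - 1) ∉ qs → (e + 1) ∉ qs →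
      h (s, e) = g s) :
    ∀ (xs pre : List Int) (s e : Int), qs = pre ++ e :: xs → s ≤ e →
      (∀ i, s ≤ i → i ≤ e → i ∈ qs) → (s - 1) ∉ qs →
      ((runsGo s e xs).map h).sum
        = g s + ((xs.filter (fun t => !(qs.contains (t - 1)))).map g).sum := by
  intro xs
  induction xs with
  | nil =>
    intro pre s e heq hse hsub hprev
    have hend : (e + 1) ∉ qs := by
      intro hmem
      rw [heq] at hmem
      have hq' : (pre ++ [e]).Pairwise (· < ·) := heq ▸ hq
      rcases List.mem_append.1 hmem with h | h
      · have := (List.pairwise_append.1 hq').2.2 _ h e List.mem_cons_self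
        omega
      · simp only [List.mem_singleton] at h
        omega
    simp [runsGo, hgh s e hse hsub hprev hend]
  | cons x xs ih =>
    intro pre s e heq hse hsub hprev
    have hq' : (pre ++ e :: x :: xs).Pairwise (· < ·) := heq ▸ hq
    obtain ⟨hpre, hrest, hcross⟩ := List.pairwise_append.1 hq'
    have hex : e < x := (List.pairwise_cons.1 hrest).1 x List.mem_cons_self
    have hxxs : ∀ b ∈ xs, x < b :=
      (List.pairwise_cons.1 (List.pairwise_cons.1 hrest).2).1
    have hexs : ∀ b ∈ xs, e < b := fun b hb =>
      (List.pairwise_cons.1 hrest).1 b (List.mem_cons_of_mem _ hb)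
    have hprelt : ∀ a ∈ pre, a < e := fun a ha => hcross a ha e List.mem_cons_self
    have hmemq : ∀ y : Int, y ∈ qs ↔ y ∈ pre ∨ y = e ∨ y = x ∨ y ∈ xs := by
      intro y; rw [heq]; simp [List.mem_append]
    have hxq : x ∈ qs := (hmemq x).2 (Or.inr (Or.inr (Or.inl rfl)))
    by_cases hx : x = e + 1
    · have heq' : qs = (pre ++ [e]) ++ x :: xs := by rw [heq]; simp
      have hsub' : ∀ i, s ≤ i → i ≤ x → i ∈ qs := by
        intro i h1 h2
        by_cases hie : i ≤ e
        · exact hsub i h1 hie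
        · have : i = x := by omega
          exact this ▸ hxq
      have := ih (pre ++ [e]) s x heq' (by omega) hsub' hprev
      have hcont : qs.contains (x - 1) = true := by
        rw [List.contains_iff_mem]
        exact hsub (x - 1) (by omega) (by omega)
      simp only [runsGo, if_pos hx]
      rw [this]
      have hx1 : (x - 1) ∈ qs := hsub (x - 1) (by omega) (by omega)
      conv_rhs => rw [List.filter_cons]
      simp [List.contains_eq_mem, hx1]
    · have hxge : e + 2 ≤ x := by omega
      have hend : (e + 1) ∉ qs := by
        intro hmem
        rcases (hmemq (e + 1)).1 hmem with h | h | h | h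
        · have := hprelt _ h; omega
        · omega
        · omega
        · have := hxxs _ h; omega
      have hxprev : (x - 1) ∉ qs := by
        intro hmem
        rcases (hmemq (x - 1)).1 hmem with h | h | h | h
        · have := hprelt _ h; omega
        · omega
        · omega
        · have := hxxs _ h; omega
      have heq' : qs = (pre ++ [e]) ++ x :: xs := by rw [heq]; simp
      have := ih (pre ++ [e]) x x heq' le_rfl
        (by intro i h1 h2; exact (le_antisymm h2 h1).symm ▸ hxq) hxprev
      simp only [runsGo, if_neg hx]
      rw [List.map_cons, List.sum_cons, this, hgh s e hse hsub hprev hend]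
      conv_rhs => rw [List.filter_cons]
      simp [List.contains_eq_mem, hxprev]

theorem runs_sum (g : Int → Nat) (h : Int × Int → Nat)
    (qs : List Int) (hq : qs.Pairwise (· < ·))
    (hgh : ∀ s e : Int, s ≤ e → (∀ i, s ≤ i → i ≤ e → i ∈ qs) → (s - 1) ∉ qs → (e + 1) ∉ qs →
      h (s, e) = g s)
    (h0 : ∀ t ∈ qs, (t - 1) ∈ qs → g t = 0) :
    ((runsOfB qs).map h).sum = (qs.map g).sum := by
  rw [runsOfB_go]
  cases qs with
  | nil => simp
  | cons x xs =>
    have hxxs : ∀ b ∈ xs, x < b := (List.pairwise_cons.1 hq).1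
    have hxprev : (x - 1) ∉ (x :: xs) := by
      intro hmem
      rcases List.mem_cons.1 hmem with h | h
      · omega
      · have := hxxs _ h; omega
    have := runsGo_sum g h (x :: xs) hq hgh xs [] x x (by simp) le_rfl
      (by intro i h1 h2; exact (le_antisymm h2 h1).symm ▸ List.mem_cons_self) hxprev
    rw [this]
    have hfe : ((x :: xs).filter (fun t => !((x :: xs).contains (t - 1))))
        = x :: (xs.filter (fun t => !((x :: xs).contains (t - 1)))) := by
      rw [List.filter_cons, if_pos (by simp [List.contains_eq_mem, hxprev])]
    have hsum := sum_filter_of_zero (x :: xs) (fun t => !((x :: xs).contains (t - 1))) g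
      (by
        intro t ht hpt
        simp only [Bool.not_eq_false'] at hpt
        exact h0 t ht (List.contains_iff_mem.mp hpt))
    rw [← hsum, hfe, List.map_cons, List.sum_cons]

-- ---------- the per-direction core ----------

theorem chains_eq (lab : String) (n : Int) (so eo : Bool) :
    clsKeys lab n so eo
      = (if n == 3 && so && eo then [lab ++ "_open3"]
        else if n == 4 && (so || eo) then [lab ++ "_open4"]
        else if decide (5 ≤ n) && so && eo then [lab ++ "_open4"]
        else []) := by
  unfold clsKeys
  rcases so <;> rcases eo <;>
    by_cases h3 : n = 3 <;> by_cases h4 : n = 4 <;> by_cases h44 : 4 ≤ n <;> by_cases h5 : 5 ≤ n <;>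
      simp [h3, h4, h44, h5] <;> omega

theorem pSet_eq (board : List (Int × Int × Int)) (hPre : Pre_count_formations board) (v : Int) :
    pSet board v = ((pvItems board).filter (fun it => it.2 == v)).map (·.1) := by
  apply PySem.Set.ofList_eq_self_of_nodup
  have h0 : ((pvItems board).map (·.1)).Nodup := by
    unfold pvItems
    rw [List.map_map]
    exact hPre
  have hsub : ((pvItems board).filter (fun it => it.2 == v)).Sublist (pvItems board) :=
    List.filter_sublist
  exact h0.sublist (hsub.map _)

theorem perline_core (board : List (Int × Int × Int)) (hPre : Pre_count_formations board)
    (lab : String) (pv : Int) (d : Int × Int) (hd : d ∈ hexDirs) (key : String) (k : Int) :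
    ((((pSet board pv).filter (fun c => (lineKeyPos d c).1 == k)).map
        (fun c => (aKeys (allOf board) (pSet board pv) lab c d).count key)).sum)
      = (((runsOfB (PySem.List.sorted
            (((pSet board pv).filter (fun c => (lineKeyPos d c).1 == k)).map (fun c => (lineKeyPos d c).2))
            (fun x => x) false)).map (fun se => (bKeys (allOf board) lab d k se).count key)).sum) := by
  set allS := allOf board with hallS
  set P := pSet board pv with hP
  set Pk := (pSet board pv).filter (fun c => (lineKeyPos d c).1 == k) with hPk
  set qs0 := Pk.map (fun c => (lineKeyPos d c).2) with hqs0
  set qs := PySem.List.sorted qs0 (fun x => x) false with hqs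
  -- nodup facts
  have hPnd : P.Nodup := PySem.Set.nodup_ofList _
  have hPknd : Pk.Nodup := hPnd.filter _
  have hkey : ∀ c ∈ Pk, (lineKeyPos d c).1 = k := by
    intro c hc
    have := (List.mem_filter.1 hc).2
    simpa using this
  have hcellback : ∀ c ∈ Pk, cellOfPos d k (lineKeyPos d c).2 = c := by
    intro c hc
    rw [← hkey c hc]
    exact cell_kp d hd c
  have hqs0nd : qs0.Nodup := by
    refine List.Nodup.map_on ?_ hPknd
    intro c1 h1 c2 h2 he
    rw [← hcellback c1 h1, ← hcellback c2 h2, he]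
  -- membership bridge
  have hmem : ∀ t : Int, cellOfPos d k t ∈ P ↔ t ∈ qs := by
    intro t
    rw [hqs, PySem.List.mem_sorted]
    constructor
    · intro hc
      have hkp := kp_cell d hd k t
      have hcPk : cellOfPos d k t ∈ Pk := by
        rw [hPk]
        refine List.mem_filter.2 ⟨hc, ?_⟩
        simp [hkp]
      have : (lineKeyPos d (cellOfPos d k t)).2 ∈ qs0 := List.mem_map_of_mem hcPk
      rwa [hkp] at this
    · intro ht
      obtain ⟨c, hc, hct⟩ := List.mem_map.1 ht
      rw [← hct, hcellback c hc]
      exact (List.mem_filter.1 hc).1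
  -- order facts
  have hqsperm : qs.Perm qs0 := PySem.List.sorted_perm qs0 (fun x => x) false
  have hqsnd : qs.Nodup := hqsperm.nodup_iff.2 hqs0nd
  have hqslt : qs.Pairwise (· < ·) := by
    have hle : qs.Pairwise (fun a b => a ≤ b) := PySem.List.sorted_pairwise qs0 (fun x => x)
    have := hle.and hqsnd
    exact this.imp (fun h => lt_of_le_of_ne h.1 h.2)
  -- length bound for fuel
  have hqslen : qs.length ≤ P.length := by
    rw [hqsperm.length_eq, hqs0]
    rw [List.length_map]
    exact List.length_filter_le _ _
  -- the per-start / per-run functions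
  set g : Int → Nat := fun t => (aKeys allS P lab (cellOfPos d k t) d).count key with hg
  set h : Int × Int → Nat := fun se => (bKeys allS lab d k se).count key with hh
  -- LHS = sum of g over qs
  have hlhs : (Pk.map (fun c => (aKeys allS P lab c d).count key)).sum = (qs.map g).sum := by
    have h1 : Pk.map (fun c => (aKeys allS P lab c d).count key) = qs0.map g := by
      rw [hqs0, List.map_map]
      refine List.map_congr_left ?_
      intro c hc
      simp only [Function.comp, hg]
      rw [hcellback c hc]
    rw [h1]
    exact ((hqsperm.map g).sum_eq).symm
  rw [hlhs]
  -- RHS via runs_sum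
  refine (runs_sum g h qs hqslt ?_ ?_).symm
  · -- hgh : a run's bKeys equal the start's aKeys
    intro s e hse hsub hsprev hend
    have hsprevP : cellOfPos d k (s - 1) ∉ P := fun hc => hsprev ((hmem (s - 1)).1 hc)
    have hcontprev : P.contains ((cellOfPos d k s).1 - d.1, (cellOfPos d k s).2 - d.2) = false := by
      rw [cell_sub d hd k s]
      simp [List.contains_eq_mem, hsprevP]
    -- walk length
    have nn : Nat := (e + 1 - s).toNat
    have hwalk : walkI qs s (P.length + 1) = ((e + 1 - s).toNat : Int) := by
      apply walkI_char qs s (e + 1 - s).toNat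
      · intro i hi
        apply hsub
        · omega
        · have : (i : Int) < e + 1 - s := by
            have := Int.toNat_of_nonneg (show (0:Int) ≤ e + 1 - s by omega)
            omega
          omega
      · have : ((e + 1 - s).toNat : Int) = e + 1 - s := Int.toNat_of_nonneg (by omega)
        rw [this]
        simpa [show s + (e + 1 - s) = e + 1 by ring] using hend
      · -- fuel bound: run length ≤ qs.length ≤ P.length
        have hsubIcc : Finset.Icc s e ⊆ qs.toFinset := by
          intro i hi
          rw [List.mem_toFinset]
          have := Finset.mem_Icc.1 hi
          exact hsub i this.1 this.2
        have hcard : (Finset.Icc s e).card ≤ qs.toFinset.card := Finset.card_le_card hsubIcc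
        rw [Int.card_Icc] at hcard
        rw [List.toFinset_card_of_nodup hqsnd] at hcard
        have : (e + 1 - s).toNat ≤ qs.length := hcard
        omega
    have hwA := walkA_line P d hd k qs hmem (P.length + 1) s
    rw [hwalk] at hwA
    have hcnt : ((e + 1 - s).toNat : Int) = e - s + 1 := by
      have := Int.toNat_of_nonneg (show (0:Int) ≤ e + 1 - s by omega)
      omega
    rw [hcnt] at hwA
    have hendcell : s + (e - s + 1) = e + 1 := by ring
    rw [hendcell] at hwA
    -- unfold both key lists and identify them
    show (bKeys allS lab d k (s, e)).count key = (aKeys allS P lab (cellOfPos d k s) d).count key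
    unfold aKeys bKeys
    rw [lineCells_eq d hd k s e, cell_sub d hd k s, hwA]
    dsimp only
    simp only [List.contains_eq_mem]
    simp only [hsprevP, decide_false, Bool.false_eq_true, if_false]
    rw [chains_eq lab (e - s + 1)]
  · -- h0 : a non-start contributes nothing
    intro t _ htp
    show (aKeys allS P lab (cellOfPos d k t) d).count key = 0
    have hmemP : cellOfPos d k (t - 1) ∈ P := (hmem (t - 1)).2 htp
    unfold aKeys
    rw [cell_sub d hd k t]
    simp [List.contains_eq_mem, hmemP]

theorem linesDict_items (items : List ((Int × Int) × Int)) (pv : Int) (d : Int × Int) :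
    (linesDict items pv d).items
      = (PySem.Set.ofList (((items.filter (fun it => it.2 == pv)).map (fun it => (lineKeyPos d it.1).1)))).map
          (fun k => (k, ((items.filter (fun it => it.2 == pv)).filter
              (fun it => (lineKeyPos d it.1).1 == k)).map (fun it => (lineKeyPos d it.1).2))) := by
  have hfold : linesDict items pv d
      = ((items.filter (fun it => it.2 == pv)).map (fun it => lineKeyPos d it.1)).foldl
          (fun dct p => dct.modify p.1 [] (· ++ [p.2])) PySem.Dict.empty := by
    unfold linesDict
    rw [List.foldl_map, ← List.foldl_filter]
  have hkeys : (linesDict items pv d).keys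
      = PySem.Set.ofList (((items.filter (fun it => it.2 == pv)).map (fun it => lineKeyPos d it.1)).map (·.1)) := by
    rw [hfold,
      PySem.Dict.keys_foldl_modify_key _ (fun p : Int × Int => p.1) [] (fun _ p => (· ++ [p.2])) PySem.Dict.empty]
    simp [PySem.Dict.keys_empty, PySem.Set.update_nil_left]
  have hnd : (linesDict items pv d).keys.Nodup := by
    rw [hkeys]; exact PySem.Set.nodup_ofList _
  rw [PySem.Dict.items_eq_map_keys _ hnd []]
  rw [hkeys]
  have hgetD : ∀ k : Int, (linesDict items pv d).getD k []
      = (((items.filter (fun it => it.2 == pv)).map (fun it => lineKeyPos d it.1)).filter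
          (fun p => p.1 == k)).map (·.2) := by
    intro k
    rw [hfold, PySem.Dict.getD_foldl_modify_append]
    simp [PySem.Dict.getD_empty]
  have hml : ((items.filter (fun it => it.2 == pv)).map (fun it => lineKeyPos d it.1)).map (·.1)
      = (items.filter (fun it => it.2 == pv)).map (fun it => (lineKeyPos d it.1).1) := by
    rw [List.map_map]; rfl
  rw [hml]
  apply List.map_congr_left
  intro k _
  rw [hgetD k]
  rw [List.filter_map, List.map_map]
  rfl

theorem dir_core (board : List (Int × Int × Int)) (hPre : Pre_count_formations board)
    (lab : String) (pv : Int) (d : Int × Int) (hd : d ∈ hexDirs) (key : String) :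
    (((pSet board pv).map (fun c => (aKeys (allOf board) (pSet board pv) lab c d).count key)).sum)
      = (((linesDict (pvItems board) pv d).items.map (fun kv =>
          ((runsOfB (PySem.List.sorted kv.2 (fun x => x) false)).map
            (fun se => (bKeys (allOf board) lab d kv.1 se).count key)).sum)).sum) := by
  have hPitems : pSet board pv = ((pvItems board).filter (fun it => it.2 == pv)).map (·.1) :=
    pSet_eq board hPre pv
  rw [linesDict_items, List.map_map]
  have hM : ((pvItems board).filter (fun it => it.2 == pv)).map (fun it => (lineKeyPos d it.1).1)
      = (pSet board pv).map (fun c => (lineKeyPos d c).1) := by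
    rw [hPitems, List.map_map]
    rfl
  rw [hM]
  rw [sum_partition (pSet board pv) (fun c => (lineKeyPos d c).1)
    (fun c => (aKeys (allOf board) (pSet board pv) lab c d).count key)
    (PySem.Set.ofList ((pSet board pv).map (fun c => (lineKeyPos d c).1)))
    (PySem.Set.nodup_ofList _)
    (by
      intro c hc
      rw [PySem.Set.mem_ofList]
      exact List.mem_map_of_mem hc)]
  apply congrArg
  apply List.map_congr_left
  intro k hk
  have hq : (((pvItems board).filter (fun it => it.2 == pv)).filter
        (fun it => (lineKeyPos d it.1).1 == k)).map (fun it => (lineKeyPos d it.1).2)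
      = ((pSet board pv).filter (fun c => (lineKeyPos d c).1 == k)).map (fun c => (lineKeyPos d c).2) := by
    rw [hPitems, List.filter_map, List.map_map]
    rfl
  simp only [Function.comp]
  rw [hq]
  exact perline_core board hPre lab pv d hd key k

theorem player_core (board : List (Int × Int × Int)) (hPre : Pre_count_formations board)
    (lab : String) (pv : Int) (key : String) :
    (((pSet board pv).flatMap (fun c => hexDirs.flatMap (fun d => aKeys (allOf board) (pSet board pv) lab c d))).count key)
      = ((hexDirs.flatMap (fun d => (linesDict (pvItems board) pv d).items.flatMap (fun kv =>
          (runsOfB (PySem.List.sorted kv.2 (fun x => x) false)).flatMap (bKeys (allOf board) lab d kv.1)))).count key) := by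
  rw [count_flatMap, count_flatMap]
  have hA : ((pSet board pv).map (fun c =>
        ((hexDirs.flatMap (fun d => aKeys (allOf board) (pSet board pv) lab c d)).count key))).sum
      = ((pSet board pv).map (fun c =>
        ((hexDirs.map (fun d => (aKeys (allOf board) (pSet board pv) lab c d).count key)).sum))).sum := by
    apply congrArg
    apply List.map_congr_left
    intro c _
    exact count_flatMap hexDirs _ key
  rw [hA, sum_swap_nat]
  apply congrArg
  apply List.map_congr_left
  intro d hd
  rw [show ((linesDict (pvItems board) pv d).items.flatMap (fun kv =>
      (runsOfB (PySem.List.sorted kv.2 (fun x => x) false)).flatMap (bKeys (allOf board) lab d kv.1))).count key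
    = ((linesDict (pvItems board) pv d).items.map (fun kv =>
        ((runsOfB (PySem.List.sorted kv.2 (fun x => x) false)).map
          (fun se => (bKeys (allOf board) lab d kv.1 se).count key)).sum)).sum from by
    rw [count_flatMap]
    apply congrArg
    apply List.map_congr_left
    intro kv _
    exact count_flatMap _ _ key]
  exact dir_core board hPre lab pv d hd key

theorem aKeys_mem (allS P : List (Int × Int)) (lab : String) (c d : Int × Int) :
    ∀ k ∈ aKeys allS P lab c d, k = lab ++ "_open3" ∨ k = lab ++ "_open4" := by
  intro k hk
  simp only [aKeys, clsKeys] at hk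
  split_ifs at hk <;> simp at hk <;> simp [hk]

theorem bKeys_mem (allS : List (Int × Int)) (lab : String) (d : Int × Int) (k : Int) (se : Int × Int) :
    ∀ x ∈ bKeys allS lab d k se, x = lab ++ "_open3" ∨ x = lab ++ "_open4" := by
  intro x hx
  simp only [bKeys] at hx
  split_ifs at hx <;> simp at hx <;> simp [hx]

-- ===== VERDICT (by name: the statement is the Claim_ definition above) =====
theorem count_formations_spec : Claim_equal_count_formations := by
  intro board _ hpre
  unfold Spec_count_formations
  rw [countA_keys board hpre, countB_keys board]
  have hflatA : ∀ (P : List (Int × Int)) (lab : String),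
      ∀ x ∈ P.flatMap (fun c => hexDirs.flatMap (fun d => aKeys (allOf board) P lab c d)),
        x = lab ++ "_open3" ∨ x = lab ++ "_open4" := by
    intro P lab x hx
    rw [List.mem_flatMap] at hx
    obtain ⟨c, _, hx⟩ := hx
    rw [List.mem_flatMap] at hx
    obtain ⟨d, _, hx⟩ := hx
    exact aKeys_mem _ _ _ _ _ x hx
  have hflatB : ∀ (pv : Int) (lab : String),
      ∀ x ∈ hexDirs.flatMap (fun d => (linesDict (pvItems board) pv d).items.flatMap (fun kv =>
          (runsOfB (PySem.List.sorted kv.2 (fun x => x) false)).flatMap (bKeys (allOf board) lab d kv.1))),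
        x = lab ++ "_open3" ∨ x = lab ++ "_open4" := by
    intro pv lab x hx
    rw [List.mem_flatMap] at hx
    obtain ⟨d, _, hx⟩ := hx
    rw [List.mem_flatMap] at hx
    obtain ⟨kv, _, hx⟩ := hx
    rw [List.mem_flatMap] at hx
    obtain ⟨se, _, hx⟩ := hx
    exact bKeys_mem _ _ _ _ _ x hx
  have hmemA : ∀ x ∈ (((pSet board 1).flatMap (fun c => hexDirs.flatMap (fun d => aKeys (allOf board) (pSet board 1) "p1" c d)))
      ++ ((pSet board (-1)).flatMap (fun c => hexDirs.flatMap (fun d => aKeys (allOf board) (pSet board (-1)) "p2" c d)))),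
      x = "p1_open3" ∨ x = "p1_open4" ∨ x = "p2_open3" ∨ x = "p2_open4" := by
    intro x hx
    rcases List.mem_append.1 hx with h | h
    · rcases hflatA (pSet board 1) "p1" x h with h' | h'
      · exact Or.inl h'
      · exact Or.inr (Or.inl h')
    · rcases hflatA (pSet board (-1)) "p2" x h with h' | h'
      · exact Or.inr (Or.inr (Or.inl h'))
      · exact Or.inr (Or.inr (Or.inr h'))
  have hmemB : ∀ x ∈ ((hexDirs.flatMap (fun d => (linesDict (pvItems board) 1 d).items.flatMap (fun kv =>
        (runsOfB (PySem.List.sorted kv.2 (fun x => x) false)).flatMap (bKeys (allOf board) "p1" d kv.1))))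
      ++ (hexDirs.flatMap (fun d => (linesDict (pvItems board) (-1) d).items.flatMap (fun kv =>
        (runsOfB (PySem.List.sorted kv.2 (fun x => x) false)).flatMap (bKeys (allOf board) "p2" d kv.1))))),
      x = "p1_open3" ∨ x = "p1_open4" ∨ x = "p2_open3" ∨ x = "p2_open4" := by
    intro x hx
    rcases List.mem_append.1 hx with h | h
    · rcases hflatB 1 "p1" x h with h' | h'
      · exact Or.inl h'
      · exact Or.inr (Or.inl h')
    · rcases hflatB (-1) "p2" x h with h' | h'
      · exact Or.inr (Or.inr (Or.inl h'))
      · exact Or.inr (Or.inr (Or.inr h'))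
  have hc : ∀ key : String,
      ((((pSet board 1).flatMap (fun c => hexDirs.flatMap (fun d => aKeys (allOf board) (pSet board 1) "p1" c d)))
        ++ ((pSet board (-1)).flatMap (fun c => hexDirs.flatMap (fun d => aKeys (allOf board) (pSet board (-1)) "p2" c d)))).count key)
      = (((hexDirs.flatMap (fun d => (linesDict (pvItems board) 1 d).items.flatMap (fun kv =>
            (runsOfB (PySem.List.sorted kv.2 (fun x => x) false)).flatMap (bKeys (allOf board) "p1" d kv.1))))
        ++ (hexDirs.flatMap (fun d => (linesDict (pvItems board) (-1) d).items.flatMap (fun kv =>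
            (runsOfB (PySem.List.sorted kv.2 (fun x => x) false)).flatMap (bKeys (allOf board) "p2" d kv.1))))).count key) := by
    intro key
    rw [List.count_append, List.count_append,
      player_core board hpre "p1" 1 key, player_core board hpre "p2" (-1) key]
  simp only [pvResult0]
  rw [incr4_eval _ hmemA 0 0 0 0, incr4_eval _ hmemB 0 0 0 0]
  simp only [hc]
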